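-- pv_equiv track=rewrite | github.com/faruk950147/faruk950147-Python-Problem-Solving | HackerRank/involtory.py | calculate_earnings
-- ===== SOURCE A (Python) =====
-- from collections import Counter
--
-- def calculate_earnings(shoe_sizes, customers):
--     stock = Counter(shoe_sizes)
--     earnings = 0
--
--     for size, price in customers:
--         if stock[size]:
--             earnings += price
--             stock[size] -= 1
--
--     return earnings
-- ===== SOURCE B (Python) =====
-- from collections import Counter
--
-- def calculate_earnings(shoe_sizes, customers):
--     # group prices by size (arrival order), then sum the first stock[size] of each group
--     stock = Counter(shoe_sizes)
--     by_size = {}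
--     for size, price in customers:
--         by_size[size] = by_size.get(size, []) + [price]
--     return sum(sum(prices[:stock[size]]) for size, prices in by_size.items())
-- ===== Notes on version B (the rewrite author's own statement) =====
-- stated objective: alternative
-- what changed: Replaces A's single streaming pass that decrements a mutable stock counter per customer with a group-then-prefix structure: prices are grouped by size in arrival order, and for each size the first stock[size] prices are summed.
import Mathlib
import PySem

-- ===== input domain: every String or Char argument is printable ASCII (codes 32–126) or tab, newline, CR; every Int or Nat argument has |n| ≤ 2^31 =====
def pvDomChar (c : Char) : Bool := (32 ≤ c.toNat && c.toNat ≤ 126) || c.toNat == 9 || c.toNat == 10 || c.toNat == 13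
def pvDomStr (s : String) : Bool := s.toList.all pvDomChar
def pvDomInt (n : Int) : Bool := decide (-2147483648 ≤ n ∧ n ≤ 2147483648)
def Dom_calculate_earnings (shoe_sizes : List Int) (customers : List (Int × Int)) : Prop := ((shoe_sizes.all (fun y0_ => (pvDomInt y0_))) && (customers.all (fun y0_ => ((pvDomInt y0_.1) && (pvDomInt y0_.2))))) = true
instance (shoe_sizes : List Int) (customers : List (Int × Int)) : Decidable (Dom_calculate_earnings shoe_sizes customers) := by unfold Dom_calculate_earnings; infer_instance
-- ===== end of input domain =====

-- B groups prices by size and sums per-size prefixes instead of A's streaming decrement pass;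
-- return values proved equal, neither version mutates its arguments observably.

-- ===== PORT A =====
-- stock = Counter(shoe_sizes); stream over customers, decrementing stock[size] when positive
def calculate_earnings (shoe_sizes : List Int) (customers : List (Int × Int)) : Int :=
  let stock := PySem.Dict.counter shoe_sizes
  (customers.foldl
    (fun (st : PySem.Dict Int Int × Int) c =>
      if st.1.getD c.1 0 ≠ 0 then
        (st.1.insert c.1 (st.1.getD c.1 0 - 1), st.2 + c.2)
      else st)
    (stock, 0)).2

-- ===== PORT B =====
-- prices[:stock[size]] : stock[size] = Counter count ≥ 0, so the slice is exactly 'take'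
def calculate_earnings_alt (shoe_sizes : List Int) (customers : List (Int × Int)) : Int :=
  let stock := PySem.Dict.counter shoe_sizes
  let by_size := customers.foldl
    (fun (d : PySem.Dict Int (List Int)) c => d.modify c.1 [] (· ++ [c.2]))
    PySem.Dict.empty
  (by_size.items.map (fun sp => (sp.2.take (stock.getD sp.1 0).toNat).sum)).sum

-- ===== PRECONDITION & SPEC =====
def Spec_calculate_earnings (shoe_sizes : List Int) (customers : List (Int × Int)) (out : Int) : Prop := out = calculate_earnings_alt shoe_sizes customers
instance (shoe_sizes : List Int) (customers : List (Int × Int)) (out : Int) : Decidable (Spec_calculate_earnings shoe_sizes customers out) := by unfold Spec_calculate_earnings; infer_instance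

-- ===== CLAIM (what is proved, stated in full; the proofs are below) =====
def Claim_equal_calculate_earnings : Prop := ∀ (shoe_sizes : List Int) (customers : List (Int × Int)), Dom_calculate_earnings shoe_sizes customers → Spec_calculate_earnings shoe_sizes customers (calculate_earnings shoe_sizes customers)

-- ===== LEMMAS AND PROOFS =====

def pricesOf (k : Int) (cs : List (Int × Int)) : List Int :=
  (cs.filter (fun p => p.1 == k)).map (·.2)

def groupedSum (d : PySem.Dict Int Int) (cs : List (Int × Int)) : Int :=
  ((PySem.Set.ofList (cs.map (·.1))).map
    (fun k => ((pricesOf k cs).take (d.getD k 0).toNat).sum)).sum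

lemma pricesOf_cons (k s p : Int) (cs : List (Int × Int)) :
    pricesOf k ((s, p) :: cs) = if s = k then p :: pricesOf k cs else pricesOf k cs := by
  by_cases h : s = k <;> simp [pricesOf, h]

lemma pricesOf_eq_nil (s : Int) (cs : List (Int × Int)) (h : s ∉ cs.map (·.1)) :
    pricesOf s cs = [] := by
  simp only [pricesOf, List.map_eq_nil_iff, List.filter_eq_nil_iff]
  intro p hp hps
  exact h (List.mem_map.mpr ⟨p, hp, by simpa using hps⟩)

lemma sum_map_discard (L : List Int) (h : Int → Int) (s : Int) (hs : h s = 0) :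
    ((PySem.Set.discard L s).map h).sum = (L.map h).sum := by
  simp only [PySem.Set.discard]
  induction L with
  | nil => rfl
  | cons a L ih =>
    by_cases ha : a = s
    · simp [ha, hs, ih]
    · simp [ha, ih]

lemma sum_cons_discard (L : List Int) (hnd : L.Nodup) (h : Int → Int) (s : Int)
    (hs : s ∉ L → h s = 0) :
    h s + ((PySem.Set.discard L s).map h).sum = (L.map h).sum := by
  simp only [PySem.Set.discard]
  induction L with
  | nil => simp [hs (List.not_mem_nil)]
  | cons a L ih =>
    rcases List.nodup_cons.mp hnd with ⟨hna, hndL⟩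
    by_cases ha : a = s
    · subst ha
      have : L.filter (fun y => !(y == a)) = L :=
        List.filter_eq_self.mpr (fun y hy => by
          simp only [Bool.not_eq_eq_eq_not, Bool.not_true, beq_eq_false_iff_ne]
          exact fun e => hna (e ▸ hy))
      simp [this]
    · have hs' : s ∉ L → h s = 0 := fun hn => hs (by simp [hn, Ne.symm ha])
      simp only [List.filter_cons]
      have hb : (!(a == s)) = true := by simp [ha]
      simp only [hb, if_true, List.map_cons, List.sum_cons]
      rw [← ih hndL hs']
      ring

lemma foldA_eq_grouped (cs : List (Int × Int)) (d : PySem.Dict Int Int) (e : Int)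
    (hpos : ∀ k, 0 ≤ d.getD k 0) :
    (cs.foldl
      (fun (st : PySem.Dict Int Int × Int) c =>
        if st.1.getD c.1 0 ≠ 0 then
          (st.1.insert c.1 (st.1.getD c.1 0 - 1), st.2 + c.2)
        else st)
      (d, e)).2 = e + groupedSum d cs := by
  induction cs generalizing d e with
  | nil => simp [groupedSum]
  | cons c cs ih =>
    obtain ⟨s, p⟩ := c
    simp only [List.foldl_cons]
    unfold groupedSum
    rw [show ((s, p) :: cs).map (·.1) = s :: cs.map (·.1) from rfl, PySem.Set.ofList_cons,
      List.map_cons, List.sum_cons]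
    by_cases hz : d.getD s 0 = 0
    · rw [if_neg (by simp [hz])]
      rw [ih d e hpos]
      have h0 : ((pricesOf s ((s, p) :: cs)).take ((d.getD s 0).toNat)).sum = 0 := by
        simp [hz]
      rw [h0, zero_add]
      have hcongr : (PySem.Set.discard (PySem.Set.ofList (cs.map (·.1))) s).map
          (fun k => ((pricesOf k ((s, p) :: cs)).take (d.getD k 0).toNat).sum)
          = (PySem.Set.discard (PySem.Set.ofList (cs.map (·.1))) s).map
          (fun k => ((pricesOf k cs).take (d.getD k 0).toNat).sum) := by
        apply List.map_congr_left
        intro k hk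
        have hks : k ≠ s := ((PySem.Set.mem_discard _ _ _).mp hk).2
        rw [pricesOf_cons, if_neg (Ne.symm hks)]
      rw [hcongr]
      unfold groupedSum
      congr 1
      exact (sum_map_discard _ _ _ (by simp [hz])).symm
    · -- stock positive: decrement and recurse
      rw [if_pos hz]
      have hv1 : 1 ≤ d.getD s 0 := lt_of_le_of_ne (hpos s) (Ne.symm hz)
      set d' := d.insert s (d.getD s 0 - 1) with hd'
      have hpos' : ∀ k, 0 ≤ d'.getD k 0 := by
        intro k
        rw [hd', PySem.Dict.getD_insert]
        split_ifs with hks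
        · omega
        · exact hpos k
      rw [ih d' (e + p) hpos']
      have hL : (PySem.Set.ofList (cs.map (·.1))).Nodup := PySem.Set.nodup_ofList _
      have hcongr : (PySem.Set.discard (PySem.Set.ofList (cs.map (·.1))) s).map
          (fun k => ((pricesOf k ((s, p) :: cs)).take (d.getD k 0).toNat).sum)
          = (PySem.Set.discard (PySem.Set.ofList (cs.map (·.1))) s).map
          (fun k => ((pricesOf k cs).take (d'.getD k 0).toNat).sum) := by
        apply List.map_congr_left
        intro k hk
        have hks : k ≠ s := ((PySem.Set.mem_discard _ _ _).mp hk).2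
        rw [pricesOf_cons, if_neg (Ne.symm hks), hd', PySem.Dict.getD_insert, if_neg hks]
      rw [hcongr]
      have hsterm : ((pricesOf s ((s, p) :: cs)).take (d.getD s 0).toNat).sum
          = p + ((pricesOf s cs).take (d'.getD s 0).toNat).sum := by
        rw [pricesOf_cons, if_pos rfl, hd', PySem.Dict.getD_insert, if_pos rfl]
        have : (d.getD s 0).toNat = ((d.getD s 0 - 1).toNat) + 1 := by omega
        rw [this, List.take_succ_cons, List.sum_cons]
      rw [hsterm]
      have hmain := sum_cons_discard (PySem.Set.ofList (cs.map (·.1))) hL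
        (fun k => ((pricesOf k cs).take (d'.getD k 0).toNat).sum) s
        (fun hn => by
          simp only []
          rw [pricesOf_eq_nil s cs (fun hm => hn ((PySem.Set.mem_ofList _ _).mpr hm))]
          simp)
      unfold groupedSum
      rw [← hmain]
      ring
lemma alt_eq_grouped (shoe_sizes : List Int) (customers : List (Int × Int)) :
    calculate_earnings_alt shoe_sizes customers
      = groupedSum (PySem.Dict.counter shoe_sizes) customers := by
  unfold calculate_earnings_alt groupedSum
  set bs := customers.foldl
    (fun (d : PySem.Dict Int (List Int)) c => d.modify c.1 [] (· ++ [c.2]))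
    PySem.Dict.empty with hbs
  have hkeys : bs.keys = PySem.Set.ofList (customers.map (·.1)) := by
    rw [hbs, PySem.Dict.keys_foldl_modify_key]
    simp [PySem.Set.update_nil_left]
  have hnd : bs.keys.Nodup := by rw [hkeys]; exact PySem.Set.nodup_ofList _
  have hitems : bs.items = bs.keys.map (fun k => (k, bs.getD k [])) :=
    PySem.Dict.items_eq_map_keys bs hnd []
  show (List.map _ bs.items).sum = _
  rw [hitems, List.map_map, hkeys]
  refine congrArg List.sum (List.map_congr_left ?_)
  intro k _
  simp only [Function.comp]
  have : bs.getD k [] = pricesOf k customers := by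
    rw [hbs, PySem.Dict.getD_foldl_modify_append]
    simp [pricesOf]
  rw [this]

-- ===== VERDICT (by name: the statement is the Claim_ definition above) =====
theorem calculate_earnings_spec : Claim_equal_calculate_earnings := by
  intro ss cs _
  show _ = _
  rw [calculate_earnings, alt_eq_grouped]
  exact (foldA_eq_grouped cs _ 0 (fun k => by
    rw [PySem.Dict.getD_counter]; exact Int.natCast_nonneg _)).trans (by ring)
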